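-- pv_equiv track=rewrite | github.com/NatanFA/ProgramasPython | PS10.py | trocamatriz4
-- ===== SOURCE A (Python) =====
-- def trocamatriz4(matriz1, matriz2, i, j, k, m, q, t, m13, m14, m15):
--     if (j<0 or j < t-m):
--         return matriz1, matriz2, m13, m14, m15
--     if matriz2[i][j] != ".":
--         if matriz2[i][j] == "#":
--             return matriz1, matriz2, m13, m14, m15
--         else:
--             if matriz1[i][j] == "X":
--                 return trocamatriz4(matriz1, matriz2, i, j-1, k, m, q, t, m13, m14, m15)
--             else:
--                 m13.append(i)
--                 m14.append(j)
--                 m15.append(matriz2[i][j])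
--                 matriz1[i][j] = "X"
--     return trocamatriz4(matriz1, matriz2, i, j-1, k, m, q, t, m13, m14, m15)
-- ===== SOURCE B (Python) =====
-- # B: iterative two-pass rewrite of A's tail recursion: one right-to-left scan
-- # collects the cells to mark (breaking at '#', reading matriz1[i][c] only when
-- # the cell is a candidate, exactly as A does), then a second pass performs all
-- # appends and 'X' marks. Mutates matriz1/m13/m14/m15 in place like A.
-- def trocamatriz4(matriz1, matriz2, i, j, k, m, q, t, m13, m14, m15):
--     lo = max(0, t - m)
--     if j < lo:
--         return matriz1, matriz2, m13, m14, m15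
--     row2 = matriz2[i]
--     picked = []
--     for c in range(j, lo - 1, -1):
--         v = row2[c]
--         if v == "#":
--             break
--         if v != "." and matriz1[i][c] != "X":
--             picked.append((c, v))
--     for c, v in picked:
--         matriz1[i][c] = "X"
--     m13.extend(i for _ in picked)
--     m14.extend(c for c, v in picked)
--     m15.extend(v for c, v in picked)
--     return matriz1, matriz2, m13, m14, m15
-- ===== Notes on version B (the rewrite author's own statement) =====
-- stated objective: alternative
-- what changed: The tail recursion over j is replaced by an iterative two-pass scan: one loop collects the columns to mark (breaking at '#'), then a second pass performs all the appends and 'X' marks at once.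
import Mathlib
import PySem

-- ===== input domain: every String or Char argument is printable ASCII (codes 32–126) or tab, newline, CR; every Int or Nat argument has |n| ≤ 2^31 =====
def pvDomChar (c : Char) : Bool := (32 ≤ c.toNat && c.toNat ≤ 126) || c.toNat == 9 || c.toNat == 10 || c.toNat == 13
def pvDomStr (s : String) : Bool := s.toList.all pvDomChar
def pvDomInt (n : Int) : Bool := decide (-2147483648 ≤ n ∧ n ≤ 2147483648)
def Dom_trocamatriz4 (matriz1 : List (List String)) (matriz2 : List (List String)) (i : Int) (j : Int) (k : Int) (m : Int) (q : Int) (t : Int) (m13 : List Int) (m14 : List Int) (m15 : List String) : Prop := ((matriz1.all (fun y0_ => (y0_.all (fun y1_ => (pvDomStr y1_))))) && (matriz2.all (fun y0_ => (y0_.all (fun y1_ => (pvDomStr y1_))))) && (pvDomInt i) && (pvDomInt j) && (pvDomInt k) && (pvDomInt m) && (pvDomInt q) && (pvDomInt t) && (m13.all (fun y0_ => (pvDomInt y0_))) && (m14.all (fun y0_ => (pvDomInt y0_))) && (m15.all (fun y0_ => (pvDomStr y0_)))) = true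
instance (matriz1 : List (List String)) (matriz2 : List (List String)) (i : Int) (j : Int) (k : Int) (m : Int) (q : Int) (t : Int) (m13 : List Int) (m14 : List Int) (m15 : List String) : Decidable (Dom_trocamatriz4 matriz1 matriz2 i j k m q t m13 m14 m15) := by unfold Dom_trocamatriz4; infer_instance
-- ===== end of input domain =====

-- ===== PORT A =====
-- A is tail-recursive on j; B replaces the recursion by an iterative collect-then-apply two-pass scan.
-- A and B mutate matriz1/m13/m14/m15 in place in Python (identically); the equivalence proved is about
-- the returned tuple, which contains the final state of those lists.
def trocamatriz4 (matriz1 : List (List String)) (matriz2 : List (List String)) (i : Int) (j : Int) (k : Int) (m : Int) (q : Int) (t : Int) (m13 : List Int) (m14 : List Int) (m15 : List String) : List (List String) × List (List String) × List Int × List Int × List String :=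
  if j < 0 ∨ j < t - m then (matriz1, matriz2, m13, m14, m15)
  else
    let c := PySem.List.pyGetD (PySem.List.pyGetD matriz2 i []) j ""
    if c ≠ "." then
      if c = "#" then (matriz1, matriz2, m13, m14, m15)
      else
        if PySem.List.pyGetD (PySem.List.pyGetD matriz1 i []) j "" = "X" then
          trocamatriz4 matriz1 matriz2 i (j - 1) k m q t m13 m14 m15
        else
          trocamatriz4
            (PySem.List.pySetD matriz1 i (PySem.List.pySetD (PySem.List.pyGetD matriz1 i []) j "X"))
            matriz2 i (j - 1) k m q t (m13 ++ [i]) (m14 ++ [j]) (m15 ++ [c])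
    else trocamatriz4 matriz1 matriz2 i (j - 1) k m q t m13 m14 m15
termination_by (j + 1).toNat
decreasing_by all_goals omega

-- ===== PORT B =====
-- first pass of B: the (column, value) pairs to mark, scanning right-to-left, breaking at '#';
-- matriz1[i][c] is read only when the cell is a candidate, as in Source B
def pickCols (matriz1 : List (List String)) (i : Int) (row2 : List String) (cols : List Int) : List (Int × String) :=
  match cols with
  | [] => []
  | c :: rest =>
    let v := PySem.List.pyGetD row2 c ""
    if v = "#" then []
    else if v ≠ "." ∧ PySem.List.pyGetD (PySem.List.pyGetD matriz1 i []) c "" ≠ "X" then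
      (c, v) :: pickCols matriz1 i row2 rest
    else pickCols matriz1 i row2 rest

def trocamatriz4_alt (matriz1 : List (List String)) (matriz2 : List (List String)) (i : Int) (j : Int) (k : Int) (m : Int) (q : Int) (t : Int) (m13 : List Int) (m14 : List Int) (m15 : List String) : List (List String) × List (List String) × List Int × List Int × List String :=
  let lo := max 0 (t - m)
  if j < lo then (matriz1, matriz2, m13, m14, m15)
  else
    let row2 := PySem.List.pyGetD matriz2 i []
    let picked := pickCols matriz1 i row2 (PySem.List.pyRange j (lo - 1) (-1))
    (picked.foldl (fun mm cv => PySem.List.pySetD mm i (PySem.List.pySetD (PySem.List.pyGetD mm i []) cv.1 "X")) matriz1,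
     matriz2,
     m13 ++ picked.map (fun _ => i),
     m14 ++ picked.map (fun cv => cv.1),
     m15 ++ picked.map (fun cv => cv.2))

-- ===== PRECONDITION & SPEC =====
-- Pre_ excludes exactly the inputs on which A raises IndexError: i outside matriz2, or a column
-- visited by the right-to-left scan (which stops at the first '#') lying outside matriz2[i], or a
-- visited non-'.', non-'#' cell while i is outside matriz1 or the column outside matriz1[i].
-- B performs the same accesses in the same situations and raises there too.
def Pre_trocamatriz4 (matriz1 : List (List String)) (matriz2 : List (List String)) (i : Int) (j : Int) (k : Int) (m : Int) (q : Int) (t : Int) (m13 : List Int) (m14 : List Int) (m15 : List String) : Prop :=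
  j < max 0 (t - m) ∨
    (PySem.Raise.InRange matriz2.length i ∧
     ∀ c ∈ PySem.List.pyRange j (max 0 (t - m) - 1) (-1),
       (∀ x ∈ PySem.List.pyRange j c (-1),
          PySem.List.pyGetD (PySem.List.pyGetD matriz2 i []) x "" ≠ "#") →
       c < ((PySem.List.pyGetD matriz2 i []).length : Int) ∧
       (PySem.List.pyGetD (PySem.List.pyGetD matriz2 i []) c "" ≠ "." ∧
        PySem.List.pyGetD (PySem.List.pyGetD matriz2 i []) c "" ≠ "#" →
        PySem.Raise.InRange matriz1.length i ∧
        c < ((PySem.List.pyGetD matriz1 i []).length : Int)))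
instance (matriz1 : List (List String)) (matriz2 : List (List String)) (i : Int) (j : Int) (k : Int) (m : Int) (q : Int) (t : Int) (m13 : List Int) (m14 : List Int) (m15 : List String) : Decidable (Pre_trocamatriz4 matriz1 matriz2 i j k m q t m13 m14 m15) := by unfold Pre_trocamatriz4; infer_instance

def pvWitness_trocamatriz4 : List (List String) × List (List String) × Int × Int × Int × Int × Int × Int × List Int × List Int × List String :=
  ([["a", "X", "."]], [["b", "c", "."]], 0, 2, 0, 0, 0, 0, [], [], [])

def Spec_trocamatriz4 (matriz1 : List (List String)) (matriz2 : List (List String)) (i : Int) (j : Int) (k : Int) (m : Int) (q : Int) (t : Int) (m13 : List Int) (m14 : List Int) (m15 : List String) (out : List (List String) × List (List String) × List Int × List Int × List String) : Prop := out = trocamatriz4_alt matriz1 matriz2 i j k m q t m13 m14 m15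
instance (matriz1 : List (List String)) (matriz2 : List (List String)) (i : Int) (j : Int) (k : Int) (m : Int) (q : Int) (t : Int) (m13 : List Int) (m14 : List Int) (m15 : List String) (out : List (List String) × List (List String) × List Int × List Int × List String) : Decidable (Spec_trocamatriz4 matriz1 matriz2 i j k m q t m13 m14 m15 out) := by unfold Spec_trocamatriz4; infer_instance

-- ===== CLAIM (what is proved, stated in full; the proofs are below) =====
def Claim_equal_trocamatriz4 : Prop := ∀ (matriz1 : List (List String)) (matriz2 : List (List String)) (i : Int) (j : Int) (k : Int) (m : Int) (q : Int) (t : Int) (m13 : List Int) (m14 : List Int) (m15 : List String), Dom_trocamatriz4 matriz1 matriz2 i j k m q t m13 m14 m15 → Pre_trocamatriz4 matriz1 matriz2 i j k m q t m13 m14 m15 → Spec_trocamatriz4 matriz1 matriz2 i j k m q t m13 m14 m15 (trocamatriz4 matriz1 matriz2 i j k m q t m13 m14 m15)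

-- ===== LEMMAS AND PROOFS =====

theorem pyIdx_some {n : Nat} {i : Int} (h : PySem.Raise.InRange n i) :
    ∃ m : Nat, PySem.List.pyIdx? n i = some m ∧ m < n := by
  obtain ⟨h1, h2⟩ := h
  unfold PySem.List.pyIdx?
  by_cases h0 : 0 ≤ i
  · exact ⟨i.toNat, by simp [h0, h2], by omega⟩
  · exact ⟨n - (-i).toNat, by simp [h0, h1], by omega⟩

theorem getD_setD_self {α : Type} (xs : List α) (i : Int) (v d : α)
    (h : PySem.Raise.InRange xs.length i) :
    PySem.List.pyGetD (PySem.List.pySetD xs i v) i d = v := by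
  obtain ⟨m, hm, hlt⟩ := pyIdx_some h
  simp [PySem.List.pyGetD, PySem.List.pyGet?, PySem.List.pySetD, PySem.List.pySet?, hm,
    List.getElem?_set, hlt]

theorem length_setD {α : Type} (xs : List α) (i : Int) (v : α) :
    (PySem.List.pySetD xs i v).length = xs.length := by
  unfold PySem.List.pySetD PySem.List.pySet? PySem.List.pyIdx?
  split_ifs <;> simp

theorem getD_setD_ne {α : Type} (xs : List α) (j c : Int) (v d : α)
    (hc : 0 ≤ c) (hj : 0 ≤ j) (hne : c ≠ j) :
    PySem.List.pyGetD (PySem.List.pySetD xs j v) c d = PySem.List.pyGetD xs c d := by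
  unfold PySem.List.pyGetD PySem.List.pyGet? PySem.List.pySetD PySem.List.pySet? PySem.List.pyIdx?
  split_ifs <;> simp_all <;> rw [List.getElem_set_ne (by omega)]

theorem pickCols_congr (matriz1 matriz1' : List (List String)) (i : Int) (row2 : List String)
    (cols : List Int)
    (h : ∀ c ∈ cols, PySem.List.pyGetD (PySem.List.pyGetD matriz1 i []) c ""
        = PySem.List.pyGetD (PySem.List.pyGetD matriz1' i []) c "") :
    pickCols matriz1 i row2 cols = pickCols matriz1' i row2 cols := by
  induction cols with
  | nil => rfl
  | cons c rest ih =>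
    have hc := h c (by simp)
    have hrest := fun x hx => h x (List.mem_cons_of_mem _ hx)
    simp only [pickCols, hc, ih hrest]

theorem troca_eq (matriz2 : List (List String)) (i k m q t : Int)
    (h2i : PySem.Raise.InRange matriz2.length i) :
    ∀ (n : Nat) (j : Int) (matriz1 : List (List String)) (m13 : List Int) (m14 : List Int)
      (m15 : List String),
      (j + 1 - max 0 (t - m)).toNat ≤ n →
      (∀ c ∈ PySem.List.pyRange j (max 0 (t - m) - 1) (-1),
        (∀ x ∈ PySem.List.pyRange j c (-1),
           PySem.List.pyGetD (PySem.List.pyGetD matriz2 i []) x "" ≠ "#") →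
        c < ((PySem.List.pyGetD matriz2 i []).length : Int) ∧
        (PySem.List.pyGetD (PySem.List.pyGetD matriz2 i []) c "" ≠ "." ∧
         PySem.List.pyGetD (PySem.List.pyGetD matriz2 i []) c "" ≠ "#" →
         PySem.Raise.InRange matriz1.length i ∧
         c < ((PySem.List.pyGetD matriz1 i []).length : Int))) →
      trocamatriz4 matriz1 matriz2 i j k m q t m13 m14 m15
        = trocamatriz4_alt matriz1 matriz2 i j k m q t m13 m14 m15 := by
  intro n
  induction n with
  | zero =>
    intro j matriz1 m13 m14 m15 hn _hpre
    have hjlo : j < max 0 (t - m) := by omega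
    rw [trocamatriz4, trocamatriz4_alt]
    simp only [if_pos (show j < 0 ∨ j < t - m by omega), if_pos hjlo]
  | succ n ih =>
    intro j matriz1 m13 m14 m15 hn hpre
    by_cases hjlo : j < max 0 (t - m)
    · rw [trocamatriz4, trocamatriz4_alt]
      simp only [if_pos (show j < 0 ∨ j < t - m by omega), if_pos hjlo]
    · set lo : Int := max 0 (t - m) with hlo
      have hj0 : 0 ≤ j := by omega
      set row2 := PySem.List.pyGetD matriz2 i [] with hrow2
      set c := PySem.List.pyGetD row2 j "" with hc
      have hjmem : j ∈ PySem.List.pyRange j (lo - 1) (-1) := by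
        rw [PySem.List.mem_pyRange_neg_one]; omega
      have hjtriv : ∀ x ∈ PySem.List.pyRange j j (-1), PySem.List.pyGetD row2 x "" ≠ "#" := by
        rw [PySem.List.pyRange_neg_one_eq_nil (le_refl j)]; simp
      obtain ⟨hj2len, hcond⟩ := hpre j hjmem hjtriv
      have hrange : PySem.List.pyRange j (lo - 1) (-1)
          = j :: PySem.List.pyRange (j - 1) (lo - 1) (-1) :=
        PySem.List.pyRange_neg_one_cons (by omega)
      -- B at j-1 from an arbitrary start state, written as an explicit tuple
      have hB : ∀ (mm : List (List String)) (a13 : List Int) (a14 : List Int) (a15 : List String),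
          trocamatriz4_alt mm matriz2 i (j - 1) k m q t a13 a14 a15
          = ((pickCols mm i row2 (PySem.List.pyRange (j - 1) (lo - 1) (-1))).foldl
               (fun mx cv => PySem.List.pySetD mx i
                 (PySem.List.pySetD (PySem.List.pyGetD mx i []) cv.1 "X")) mm,
             matriz2,
             a13 ++ (pickCols mm i row2 (PySem.List.pyRange (j - 1) (lo - 1) (-1))).map
               (fun _ => i),
             a14 ++ (pickCols mm i row2 (PySem.List.pyRange (j - 1) (lo - 1) (-1))).map
               (fun cv => cv.1),
             a15 ++ (pickCols mm i row2 (PySem.List.pyRange (j - 1) (lo - 1) (-1))).map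
               (fun cv => cv.2)) := by
        intro mm a13 a14 a15
        by_cases hj1 : j - 1 < lo
        · rw [trocamatriz4_alt]
          simp only [← hlo, if_pos hj1]
          rw [PySem.List.pyRange_neg_one_eq_nil (by omega)]
          simp [pickCols]
        · rw [trocamatriz4_alt]
          simp only [← hlo, ← hrow2, if_neg hj1]
      -- hypothesis transfer to j-1 (same or updated matriz1)
      have htrans : ∀ (mm : List (List String)),
          PySem.List.pyGetD row2 j "" ≠ "#" →
          (∀ cx ∈ PySem.List.pyRange j (lo - 1) (-1),
            (∀ x ∈ PySem.List.pyRange j cx (-1), PySem.List.pyGetD row2 x "" ≠ "#") →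
            cx < ((row2).length : Int) ∧
            (PySem.List.pyGetD row2 cx "" ≠ "." ∧ PySem.List.pyGetD row2 cx "" ≠ "#" →
             PySem.Raise.InRange mm.length i ∧
             cx < ((PySem.List.pyGetD mm i []).length : Int))) →
          (∀ cx ∈ PySem.List.pyRange (j - 1) (lo - 1) (-1),
            (∀ x ∈ PySem.List.pyRange (j - 1) cx (-1), PySem.List.pyGetD row2 x "" ≠ "#") →
            cx < ((row2).length : Int) ∧
            (PySem.List.pyGetD row2 cx "" ≠ "." ∧ PySem.List.pyGetD row2 cx "" ≠ "#" →
             PySem.Raise.InRange mm.length i ∧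
             cx < ((PySem.List.pyGetD mm i []).length : Int))) := by
        intro mm hhash hp cx hcx hnh
        have hcx' := (PySem.List.mem_pyRange_neg_one).mp hcx
        apply hp cx (by rw [PySem.List.mem_pyRange_neg_one]; omega)
        intro x hx
        have hx' := (PySem.List.mem_pyRange_neg_one).mp hx
        by_cases hxj : x = j
        · rw [hxj]; exact hhash
        · exact hnh x (by rw [PySem.List.mem_pyRange_neg_one]; omega)
      rw [trocamatriz4]
      rw [trocamatriz4_alt]
      simp only [← hlo, ← hrow2, ← hc,
        if_neg (show ¬ (j < 0 ∨ j < t - m) by omega), if_neg (show ¬ j < lo by omega)]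
      rw [hrange]
      simp only [pickCols, ← hc]
      by_cases hdot : c = "."
      · -- '.' cell: A recurses unchanged; B's scan skips column j
        simp only [if_neg (show ¬ c ≠ "." by simp [hdot]),
          if_neg (show ¬ c = "#" by rw [hdot]; decide),
          if_neg (show ¬ (¬ c = "." ∧
            ¬ PySem.List.pyGetD (PySem.List.pyGetD matriz1 i []) j "" = "X") by simp [hdot])]
        rw [ih (j - 1) matriz1 m13 m14 m15 (by omega)
          (htrans matriz1 (by rw [← hc, hdot]; decide) hpre), hB]
      · by_cases hhash : c = "#"
        · -- '#' cell: A stops; B's scan is empty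
          simp only [if_pos (show c ≠ "." from hdot), if_pos hhash]
          simp [pickCols]
        · rw [← hc] at hcond
          obtain ⟨h1i, hj1len⟩ := hcond ⟨hdot, hhash⟩
          by_cases hX : PySem.List.pyGetD (PySem.List.pyGetD matriz1 i []) j "" = "X"
          · -- already marked: A skips; B's scan skips column j
            simp only [if_pos (show c ≠ "." from hdot), if_neg hhash, if_pos hX,
              if_neg (show ¬ (¬ c = "." ∧
                ¬ PySem.List.pyGetD (PySem.List.pyGetD matriz1 i []) j "" = "X") by simp [hX])]
            rw [ih (j - 1) matriz1 m13 m14 m15 (by omega)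
              (htrans matriz1 (by rw [← hc]; exact hhash) hpre), hB]
          · -- new mark at column j
            simp only [if_pos (show c ≠ "." from hdot), if_neg hhash, if_neg hX,
              if_pos (show (¬ c = "." ∧
                ¬ PySem.List.pyGetD (PySem.List.pyGetD matriz1 i []) j "" = "X")
                from ⟨hdot, hX⟩)]
            set row1 := PySem.List.pyGetD matriz1 i [] with hrow1
            set matriz1' := PySem.List.pySetD matriz1 i (PySem.List.pySetD row1 j "X")
              with hm1'
            have hrow1' : PySem.List.pyGetD matriz1' i [] = PySem.List.pySetD row1 j "X" := by
              rw [hm1']; exact getD_setD_self matriz1 i _ [] h1i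
            have hlen1' : matriz1'.length = matriz1.length := by rw [hm1']; exact length_setD ..
            have hpick : pickCols matriz1' i row2 (PySem.List.pyRange (j - 1) (lo - 1) (-1))
                = pickCols matriz1 i row2 (PySem.List.pyRange (j - 1) (lo - 1) (-1)) := by
              apply pickCols_congr
              intro x hx
              have hx' := (PySem.List.mem_pyRange_neg_one).mp hx
              rw [hrow1', ← hrow1]
              exact getD_setD_ne row1 j x "X" "" (by omega) hj0 (by omega)
            have hpre' : ∀ cx ∈ PySem.List.pyRange (j - 1) (lo - 1) (-1),
                (∀ x ∈ PySem.List.pyRange (j - 1) cx (-1),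
                   PySem.List.pyGetD row2 x "" ≠ "#") →
                cx < ((row2).length : Int) ∧
                (PySem.List.pyGetD row2 cx "" ≠ "." ∧ PySem.List.pyGetD row2 cx "" ≠ "#" →
                 PySem.Raise.InRange matriz1'.length i ∧
                 cx < ((PySem.List.pyGetD matriz1' i []).length : Int)) := by
              intro cx hcx hnh
              obtain ⟨hl, hr⟩ := htrans matriz1 (by rw [← hc]; exact hhash) hpre cx hcx hnh
              refine ⟨hl, fun hv => ?_⟩
              obtain ⟨ha, hb⟩ := hr hv
              exact ⟨by rw [hlen1']; exact ha, by rw [hrow1', length_setD]; exact hb⟩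
            rw [ih (j - 1) matriz1' (m13 ++ [i]) (m14 ++ [j]) (m15 ++ [c]) (by omega) hpre',
              hB, hpick]
            simp only [List.foldl_cons, List.map_cons, ← hrow1, ← hm1']
            simp [List.append_assoc]

-- ===== VERDICT (by name: the statement is the Claim_ definition above) =====
theorem trocamatriz4_spec : Claim_equal_trocamatriz4 := by
  intro matriz1 matriz2 i j k m q t m13 m14 m15 _hdom hpre
  show trocamatriz4 matriz1 matriz2 i j k m q t m13 m14 m15
    = trocamatriz4_alt matriz1 matriz2 i j k m q t m13 m14 m15
  rcases hpre with hjlo | ⟨h2i, hrest⟩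
  · rw [trocamatriz4, trocamatriz4_alt]
    simp only [if_pos (show j < 0 ∨ j < t - m by omega), if_pos hjlo]
  · exact troca_eq matriz2 i k m q t h2i (j + 1 - max 0 (t - m)).toNat j matriz1 m13 m14 m15
      (le_refl _) hrest
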